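-- pv_equiv track=rewrite | github.com/AmDumDee/rossetacode | python/Continued_fraction_Arithmetic_Gmatrix_ng_continued_fraction_n1_continued_fraction_n2.py | cf2string
-- ===== SOURCE A (Python) =====
-- def cf2string (cf, max_terms = 20):
--     i = 0
--     s = "["
--     done = False
--     while not done:
--         term = cf[i]
--         if term is None:
--             s += "]"
--             done = True
--         elif i == max_terms:
--             s += ",...]"
--             done = True
--         else:
--             if i == 0:
--                 separator = ""
--             elif i == 1:
--                 separator = ";"
--             else:
--                 separator = ","
--             s += separator
--             s += str (term)
--             i += 1
--     return s
-- ===== SOURCE B (Python) =====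
-- def cf2string(cf, max_terms=20):
--     # Pass 1: find the stopping index (first None, or index == max_terms), same priority as A.
--     stop = next(i for i, t in enumerate(cf) if t is None or i == max_terms)
--     tail = "]" if cf[stop] is None else ",...]"
--     # Pass 2: render the collected terms with the [a0; a1, a2, ...] layout.
--     terms = [str(t) for t in cf[:stop]]
--     if len(terms) <= 1:
--         return "[" + "".join(terms) + tail
--     return "[" + terms[0] + ";" + ",".join(terms[1:]) + tail
-- ===== Notes on version B (the rewrite author's own statement) =====
-- stated objective: simpler
-- what changed: Replaces A's single interleaved loop (accumulating the string while choosing a separator per index) by two passes: first find the stopping index with a scan, then render the collected terms with a slice and ','.join.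
import Mathlib
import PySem

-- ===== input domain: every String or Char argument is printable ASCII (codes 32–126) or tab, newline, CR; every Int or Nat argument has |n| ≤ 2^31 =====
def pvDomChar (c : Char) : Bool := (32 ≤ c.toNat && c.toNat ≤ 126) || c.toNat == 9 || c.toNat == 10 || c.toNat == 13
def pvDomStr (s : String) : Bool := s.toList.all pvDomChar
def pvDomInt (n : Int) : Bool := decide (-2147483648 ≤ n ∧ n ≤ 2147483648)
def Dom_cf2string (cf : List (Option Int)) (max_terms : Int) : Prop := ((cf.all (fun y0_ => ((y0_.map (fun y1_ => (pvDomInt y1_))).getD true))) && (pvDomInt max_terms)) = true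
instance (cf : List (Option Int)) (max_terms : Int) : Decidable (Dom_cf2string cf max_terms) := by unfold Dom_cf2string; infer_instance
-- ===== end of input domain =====

-- B splits A's single interleaved loop into two passes (find the stop index, then render with join); same cost, simpler.

-- ===== PORT A =====
-- the if/elif separator chain of A
def pySep (i : Nat) : String := if i = 0 then "" else if i = 1 then ";" else ","

-- A's while-loop; fuel bounds the iterations (the loop reads cf[i] with i increasing,
-- so it runs at most cf.length+1 times before returning or raising IndexError).
def cf2stringLoop (cf : List (Option Int)) (max_terms : Int) : Nat → Nat → String → String
  | 0, _, s => s
  | fuel+1, i, s =>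
    match PySem.List.pyGet? cf (i : Int) with
    | none => s          -- Python raises IndexError here; excluded by Pre_
    | some term =>
      match term with
      | none => s ++ "]"
      | some t =>
        if (i : Int) = max_terms then s ++ ",...]"
        else cf2stringLoop cf max_terms fuel (i+1) (s ++ pySep i ++ PySem.Int.toStr t)

def cf2string (cf : List (Option Int)) (max_terms : Int) : String :=
  cf2stringLoop cf max_terms (cf.length + 1) 0 "["

-- ===== PORT B =====
-- pass 1 of B: next(i for i, t in enumerate(cf) if t is None or i == max_terms)
def findStop (max_terms : Int) : List (Option Int) → Nat → Option Nat
  | [], _ => none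
  | t :: rest, i => if t = none ∨ (i : Int) = max_terms then some i else findStop max_terms rest (i+1)

def cf2string_alt (cf : List (Option Int)) (max_terms : Int) : String :=
  match findStop max_terms cf 0 with
  | none => ""         -- Python raises StopIteration here; excluded by Pre_
  | some stop =>
    let tail := if PySem.List.pyGet? cf (stop : Int) = some none then "]" else ",...]"
    let terms := (cf.take stop).map (fun t => PySem.Int.toStr (t.getD 0))  -- all entries before stop are non-None
    if terms.length ≤ 1 then "[" ++ PySem.Str.join "" terms ++ tail
    else "[" ++ terms.headD "" ++ ";" ++ PySem.Str.join "," terms.tail ++ tail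

-- ===== PRECONDITION & SPEC =====
-- Pre_ holds exactly when the loop reaches a terminator (a None entry, or index max_terms)
-- before running off the end of cf; otherwise A raises IndexError (and B StopIteration).
def Pre_cf2string (cf : List (Option Int)) (max_terms : Int) : Prop :=
  ∃ i, i < cf.length ∧ (cf[i]? = some none ∨ (i : Int) = max_terms)
instance (cf : List (Option Int)) (max_terms : Int) : Decidable (Pre_cf2string cf max_terms) := by unfold Pre_cf2string; infer_instance

def pvWitness_cf2string : List (Option Int) × Int := ([some 3, some 7, none], 20)

def Spec_cf2string (cf : List (Option Int)) (max_terms : Int) (out : String) : Prop := out = cf2string_alt cf max_terms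
instance (cf : List (Option Int)) (max_terms : Int) (out : String) : Decidable (Spec_cf2string cf max_terms out) := by unfold Spec_cf2string; infer_instance

-- ===== CLAIM (what is proved, stated in full; the proofs are below) =====
def Claim_equal_cf2string : Prop := ∀ (cf : List (Option Int)) (max_terms : Int), Dom_cf2string cf max_terms → Pre_cf2string cf max_terms → Spec_cf2string cf max_terms (cf2string cf max_terms)

-- ===== LEMMAS AND PROOFS =====

-- proof-side canonical form: terms (already stringified) collected up to the terminator, plus the closing string
def collectT (max_terms : Int) : List (Option Int) → Nat → Option (List String × String)
  | [], _ => none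
  | t :: rest, i =>
    match t with
    | none => some ([], "]")
    | some v =>
      if (i : Int) = max_terms then some ([], ",...]")
      else (collectT max_terms rest (i+1)).map (fun p => (PySem.Int.toStr v :: p.1, p.2))

def renderSep : Nat → List String → String
  | _, [] => ""
  | i, t :: rest => pySep i ++ t ++ renderSep (i+1) rest

theorem collectT_isSome (mt : Int) :
    ∀ (suf : List (Option Int)) (i : Nat),
      (∃ k, k < suf.length ∧ (suf[k]? = some none ∨ ((i + k : Nat) : Int) = mt)) →
      ∃ p, collectT mt suf i = some p := by
  intro suf
  induction suf with
  | nil => intro i ⟨k, hk, _⟩; simp at hk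
  | cons t rest ih =>
    intro i ⟨k, hk, hterm⟩
    cases t with
    | none => exact ⟨([], "]"), rfl⟩
    | some v =>
      by_cases hmt : (i : Int) = mt
      · exact ⟨([], ",...]"), by simp [collectT, hmt]⟩
      · cases k with
        | zero =>
          simp at hterm
          exact absurd hterm hmt
        | succ k' =>
          obtain ⟨p, hp⟩ := ih (i+1) ⟨k', by simpa using hk, by
            have h2 : rest[k']? = some none ∨ ((i + (k'+1) : Nat) : Int) = mt := by simpa using hterm
            have : ((i + (k'+1) : Nat) : Int) = (((i+1) + k' : Nat) : Int) := by push_cast; ring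
            rw [this] at h2
            exact h2⟩
          exact ⟨(PySem.Int.toStr v :: p.1, p.2), by simp [collectT, hmt, hp]⟩

theorem loopA_eq (cf : List (Option Int)) (mt : Int) :
    ∀ (suf : List (Option Int)) (i : Nat) (fuel : Nat) (s : String) (ts : List String) (tl : String),
      cf.drop i = suf → suf.length < fuel → collectT mt suf i = some (ts, tl) →
      cf2stringLoop cf mt fuel i s = s ++ renderSep i ts ++ tl := by
  intro suf
  induction suf with
  | nil => intro i fuel s ts tl _ _ hc; simp [collectT] at hc
  | cons t rest ih =>
    intro i fuel s ts tl hdrop hfuel hc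
    cases fuel with
    | zero => omega
    | succ f =>
      have hget : PySem.List.pyGet? cf (i : Int) = some t := by
        rw [PySem.List.pyGet?_natCast, ← List.head?_drop, hdrop]; rfl
      have hdrop' : cf.drop (i+1) = rest := by
        rw [← List.tail_drop, hdrop]; rfl
      cases t with
      | none =>
        simp [collectT] at hc
        obtain ⟨rfl, rfl⟩ := hc
        simp only [cf2stringLoop, hget]
        simp [renderSep]
      | some v =>
        by_cases hmt : (i : Int) = mt
        · simp [collectT, hmt] at hc
          obtain ⟨rfl, rfl⟩ := hc
          simp only [cf2stringLoop, hget]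
          rw [if_pos hmt]
          simp [renderSep]
        · simp only [collectT, hmt, if_false, Option.map_eq_some_iff] at hc
          obtain ⟨⟨ts', tl'⟩, hc', heq⟩ := hc
          injection heq with h1 h2
          subst h1; subst h2
          have hih := ih (i+1) f (s ++ pySep i ++ PySem.Int.toStr v) ts' tl' hdrop'
            (by simp at hfuel ⊢; omega) hc'
          simp only [cf2stringLoop, hget]
          rw [if_neg hmt, hih]
          simp [renderSep, String.append_assoc]

theorem collectT_char (mt : Int) :
    ∀ (suf : List (Option Int)) (i : Nat) (ts : List String) (tl : String),
      collectT mt suf i = some (ts, tl) →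
      findStop mt suf i = some (i + ts.length) ∧
      ts = (suf.take ts.length).map (fun t => PySem.Int.toStr (t.getD 0)) ∧
      tl = (if suf[ts.length]? = some none then "]" else ",...]") := by
  intro suf
  induction suf with
  | nil => intro i ts tl hc; simp [collectT] at hc
  | cons t rest ih =>
    intro i ts tl hc
    cases t with
    | none =>
      simp [collectT] at hc
      obtain ⟨h1, h2⟩ := hc
      subst h1; subst h2
      refine ⟨by simp [findStop], by simp, by simp⟩
    | some v =>
      by_cases hmt : (i : Int) = mt
      · simp [collectT, hmt] at hc
        obtain ⟨h1, h2⟩ := hc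
        subst h1; subst h2
        refine ⟨by simp [findStop, hmt], by simp, by simp⟩
      · simp only [collectT, hmt, if_false, Option.map_eq_some_iff] at hc
        obtain ⟨⟨ts', tl'⟩, hc', heq⟩ := hc
        injection heq with h1 h2
        subst h1; subst h2
        obtain ⟨hf, hts, htl⟩ := ih (i+1) ts' tl' hc'
        refine ⟨?_, ?_, ?_⟩
        · simp [findStop, hmt, hf]; omega
        · simp [List.take_succ_cons, ← hts]
        · simpa using htl

theorem join_comma_eq (b : String) :
    ∀ (rest : List String) (i : Nat), 2 ≤ i →
      PySem.Str.join "," (b :: rest) = b ++ renderSep i rest := by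
  intro rest
  induction rest generalizing b with
  | nil => intro i _; simp [renderSep, PySem.Str.join]
  | cons c r ih =>
    intro i hi
    have hsep : pySep i = "," := by
      unfold pySep
      rw [if_neg (by omega), if_neg (by omega)]
    have hjoin : PySem.Str.join "," (b :: c :: r) = b ++ "," ++ PySem.Str.join "," (c :: r) := by
      simp [PySem.Str.join, PySem.Chars.join_cons_cons]
      apply String.toList_injective
      simp
    rw [hjoin, ih c (i+1) (by omega)]
    simp [renderSep, hsep, String.append_assoc]

theorem altB_eq (cf : List (Option Int)) (mt : Int) (ts : List String) (tl : String)
    (hc : collectT mt cf 0 = some (ts, tl)) :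
    cf2string_alt cf mt = "[" ++ renderSep 0 ts ++ tl := by
  obtain ⟨hf, hts, htl⟩ := collectT_char mt cf 0 ts tl hc
  rw [Nat.zero_add] at hf
  unfold cf2string_alt
  rw [hf]
  simp only [PySem.List.pyGet?_natCast, ← hts, ← htl]
  match ts with
  | [] => simp [renderSep, PySem.Str.join]
  | [a] =>
    simp [renderSep, pySep, PySem.Str.join]
  | a :: b :: r =>
    rw [if_neg (by simp)]
    rw [List.tail_cons, join_comma_eq b r 2 (by omega)]
    simp [renderSep, pySep, String.append_assoc]

-- ===== VERDICT (by name: the statement is the Claim_ definition above) =====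
theorem cf2string_spec : Claim_equal_cf2string := by
  intro cf mt _ hpre
  obtain ⟨k, hk, hterm⟩ := hpre
  obtain ⟨⟨ts, tl⟩, hc⟩ := collectT_isSome mt cf 0 ⟨k, hk, by simpa using hterm⟩
  unfold Spec_cf2string cf2string
  rw [loopA_eq cf mt cf 0 (cf.length + 1) "[" ts tl (by simp) (by omega) hc,
      altB_eq cf mt ts tl hc]
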